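-- pv_equiv track=rewrite | github.com/AdamMeyers/The_Termolator | abbreviation_error_detector.py | different_characters
-- ===== SOURCE A (Python) =====
-- def different_characters(string1,string2):
--     if len(string1) > len(string2):
--         pivot = string2
--     else:
--         pivot = string1
--     for char in pivot:
--         if (char in string1) and (char in string2):
--             string1 = string1.replace(char,'',1)
--             string2 = string2.replace(char,'',1)
--     return(len(string1+string2))
-- ===== SOURCE B (Python) =====
-- def different_characters(string1, string2):
--     s1 = sorted(string1)
--     s2 = sorted(string2)
--     i = j = diff = 0
--     while i < len(s1) and j < len(s2):
--         if s1[i] == s2[j]: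
--             i += 1
--             j += 1
--         elif s1[i] < s2[j]:
--             diff += 1
--             i += 1
--         else:
--             diff += 1
--             j += 1
--     return diff + (len(s1) - i) + (len(s2) - j)
-- ===== Notes on version B (the rewrite author's own statement) =====
-- stated objective: faster
-- what changed: Replaced the one-at-a-time scan-and-replace loop (quadratic substring scans over both strings) by sort-both-strings plus a single two-pointer merge that counts the multiset symmetric difference directly.
import Mathlib
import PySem

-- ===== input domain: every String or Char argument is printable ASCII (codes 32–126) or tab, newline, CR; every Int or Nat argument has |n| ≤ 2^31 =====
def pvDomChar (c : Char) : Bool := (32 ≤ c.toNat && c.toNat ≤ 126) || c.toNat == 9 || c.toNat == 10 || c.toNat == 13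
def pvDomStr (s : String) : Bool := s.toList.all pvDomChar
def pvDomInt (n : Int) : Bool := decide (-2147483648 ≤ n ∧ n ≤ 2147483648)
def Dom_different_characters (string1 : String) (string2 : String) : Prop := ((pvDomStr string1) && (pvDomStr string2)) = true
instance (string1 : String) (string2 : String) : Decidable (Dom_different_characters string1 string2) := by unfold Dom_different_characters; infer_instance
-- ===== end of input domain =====

-- B replaces A's repeated substring-scan-and-replace loop by sorting both strings and
-- counting the multiset symmetric difference with one two-pointer merge (objective: faster).


-- ===== PORT A =====
-- the for-loop over pivot's characters; `char in s` for a single character is exactly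
-- character membership, and s.replace(char, '', 1) removes exactly the first occurrence
-- of char, i.e. List.erase (both exact here since char always has length 1)
def dcLoop : List Char → List Char → List Char → List Char × List Char
  | [], s1, s2 => (s1, s2)
  | c :: rest, s1, s2 =>
    if c ∈ s1 ∧ c ∈ s2 then dcLoop rest (s1.erase c) (s2.erase c)
    else dcLoop rest s1 s2

def different_characters (string1 : String) (string2 : String) : Int :=
  let l1 := string1.toList
  let l2 := string2.toList
  let pivot := if l1.length > l2.length then l2 else l1
  let r := dcLoop pivot l1 l2
  ((r.1 ++ r.2).length : Int)

-- ===== PORT B =====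
-- the while-loop over indices i, j; recursion on the two (sorted) lists plays the role of
-- the two advancing indices, and the leftover tails are the trailing (len - i)/(len - j) terms
def mergeDiff : List Char → List Char → Int
  | [], l2 => (l2.length : Int)
  | a :: l1, [] => ((a :: l1).length : Int)
  | a :: l1, b :: l2 =>
    if a = b then mergeDiff l1 l2
    else if a < b then 1 + mergeDiff l1 (b :: l2)
    else 1 + mergeDiff (a :: l1) l2

def different_characters_alt (string1 : String) (string2 : String) : Int :=
  mergeDiff (PySem.List.sorted string1.toList (fun x => x) false)
            (PySem.List.sorted string2.toList (fun x => x) false)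

-- ===== PRECONDITION & SPEC =====
def Spec_different_characters (string1 : String) (string2 : String) (out : Int) : Prop := out = different_characters_alt string1 string2
instance (string1 : String) (string2 : String) (out : Int) : Decidable (Spec_different_characters string1 string2 out) := by unfold Spec_different_characters; infer_instance

-- ===== CLAIM (what is proved, stated in full; the proofs are below) =====
def Claim_equal_different_characters : Prop := ∀ (string1 : String) (string2 : String), Dom_different_characters string1 string2 → Spec_different_characters string1 string2 (different_characters string1 string2)

-- ===== LEMMAS AND PROOFS =====

-- size of the multiset symmetric difference: the common value both programs compute
def sdCard (l1 l2 : List Char) : Nat :=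
  Multiset.card (((l1 : Multiset Char) - (l2 : Multiset Char)) + ((l2 : Multiset Char) - (l1 : Multiset Char)))

theorem sdCard_comm (l1 l2 : List Char) : sdCard l1 l2 = sdCard l2 l1 := by
  simp [sdCard, Nat.add_comm]

theorem sdCard_nil_left (l2 : List Char) : sdCard [] l2 = l2.length := by
  simp [sdCard]

theorem sdCard_nil_right (l1 : List Char) : sdCard l1 [] = l1.length := by
  simp [sdCard]

theorem sdCard_cons_cons (a : Char) (l1 l2 : List Char) :
    sdCard (a :: l1) (a :: l2) = sdCard l1 l2 := by
  have e : ∀ u v : List Char,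
      ((a :: u : List Char) : Multiset Char) - ((a :: v : List Char) : Multiset Char)
        = (u : Multiset Char) - (v : Multiset Char) := by
    intro u v
    ext x
    by_cases hx : x = a
    · subst hx; simp [List.count_diff, List.count_cons, List.count_erase]
    · simp [List.count_diff, List.count_cons, List.count_erase, hx, Ne.symm hx]
  simp only [sdCard, e]

theorem sdCard_cons_left (a : Char) (l1 l2 : List Char) (ha : a ∉ l2) :
    sdCard (a :: l1) l2 = 1 + sdCard l1 l2 := by
  have hc : l2.count a = 0 := List.count_eq_zero.2 ha
  have h1 : ((a :: l1 : List Char) : Multiset Char) - (l2 : Multiset Char)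
      = a ::ₘ ((l1 : Multiset Char) - (l2 : Multiset Char)) := by
    ext x
    by_cases hx : a = x
    · subst hx; simp [List.count_diff, List.count_cons, Multiset.count_cons, hc]
    · simp [List.count_diff, List.count_cons, Multiset.count_cons, hx, Ne.symm hx]
  have h2 : (l2 : Multiset Char) - ((a :: l1 : List Char) : Multiset Char)
      = (l2 : Multiset Char) - (l1 : Multiset Char) := by
    ext x
    by_cases hx : a = x
    · subst hx; simp [List.count_diff, List.count_cons, List.count_erase, hc]
    · simp [List.count_diff, List.count_cons, List.count_erase, hx, Ne.symm hx]
  simp only [sdCard, h1, h2]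
  simp [Nat.add_comm]

-- sorted-merge side: on sorted inputs mergeDiff computes the symmetric-difference size
theorem mergeDiff_eq_sdCard (l1 l2 : List Char)
    (h1 : l1.Pairwise (· ≤ ·)) (h2 : l2.Pairwise (· ≤ ·)) :
    mergeDiff l1 l2 = (sdCard l1 l2 : Int) := by
  induction l1 generalizing l2 with
  | nil => simp [mergeDiff, sdCard_nil_left]
  | cons a t1 ih1 =>
    induction l2 with
    | nil => simp [mergeDiff, sdCard_nil_right]
    | cons b t2 ih2 =>
      rw [List.pairwise_cons] at h1 h2
      by_cases hab : a = b
      · subst hab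
        simp only [mergeDiff, eq_self_iff_true, if_true]
        rw [ih1 t2 h1.2 h2.2, sdCard_cons_cons]
      · by_cases hlt : a < b
        · have hnotin : a ∉ b :: t2 := by
            intro hmem
            rcases List.mem_cons.1 hmem with h | h
            · exact hab h
            · exact absurd (lt_of_lt_of_le hlt (h2.1 a h)) (lt_irrefl a)
          simp only [mergeDiff, if_neg hab, if_pos hlt]
          rw [ih1 (b :: t2) h1.2 (by rw [List.pairwise_cons]; exact h2),
            sdCard_cons_left a t1 (b :: t2) hnotin]
          push_cast; ring
        · have hba : b < a := lt_of_le_of_ne (le_of_not_gt hlt) (fun he => hab he.symm)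
          have hnotin : b ∉ a :: t1 := by
            intro hmem
            rcases List.mem_cons.1 hmem with h | h
            · exact hab h.symm
            · exact absurd (lt_of_lt_of_le hba (h1.1 b h)) (lt_irrefl b)
          simp only [mergeDiff, if_neg hab, if_neg hlt]
          rw [ih2 h2.2]
          rw [sdCard_comm (a :: t1) (b :: t2), sdCard_cons_left b t2 (a :: t1) hnotin,
            sdCard_comm t2 (a :: t1)]
          push_cast; ring

theorem sdCard_perm_left (l1 l1' l2 : List Char) (h : l1.Perm l1') : sdCard l1 l2 = sdCard l1' l2 := by
  simp only [sdCard]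
  rw [Multiset.coe_eq_coe.2 h]

theorem sdCard_perm_right (l1 l2 l2' : List Char) (h : l2.Perm l2') : sdCard l1 l2 = sdCard l1 l2' := by
  simp only [sdCard]
  rw [Multiset.coe_eq_coe.2 h]

-- A-side loop invariant: dcLoop removes, from each string, min(count in the processed pivot
-- prefix, count in string1, count in string2) copies of every character
theorem dcLoop_coe (p s1 s2 : List Char) :
    ((dcLoop p s1 s2).1 : Multiset Char)
        = (s1 : Multiset Char) - ((p : Multiset Char) ∩ (s1 : Multiset Char) ∩ (s2 : Multiset Char))
    ∧ ((dcLoop p s1 s2).2 : Multiset Char)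
        = (s2 : Multiset Char) - ((p : Multiset Char) ∩ (s1 : Multiset Char) ∩ (s2 : Multiset Char)) := by
  induction p generalizing s1 s2 with
  | nil => simp [dcLoop]
  | cons c rest ih =>
    by_cases hc : c ∈ s1 ∧ c ∈ s2
    · have hp1 : 1 ≤ s1.count c := List.count_pos_iff.2 hc.1
      have hp2 : 1 ≤ s2.count c := List.count_pos_iff.2 hc.2
      have he1 : ((s1.erase c : List Char) : Multiset Char) = ((s1 : Multiset Char)).erase c := by simp
      have he2 : ((s2.erase c : List Char) : Multiset Char) = ((s2 : Multiset Char)).erase c := by simp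
      have key : ∀ t : List Char, 1 ≤ t.count c →
          (t : Multiset Char).erase c
              - ((rest : Multiset Char) ∩ ((s1 : Multiset Char)).erase c ∩ ((s2 : Multiset Char)).erase c)
            = (t : Multiset Char)
              - (((c :: rest : List Char) : Multiset Char) ∩ (s1 : Multiset Char) ∩ (s2 : Multiset Char)) := by
        intro t ht
        ext x
        by_cases hx : c = x
        · subst hx
          simp [List.count_diff, List.count_cons, List.count_bagInter, List.count_erase,
            Multiset.count_inter, Multiset.count_erase_self]
          omega
        · simp [List.count_diff, List.count_cons, List.count_bagInter, List.count_erase,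
            Multiset.count_inter, Multiset.count_erase_of_ne (Ne.symm hx), hx, Ne.symm hx]
      simp only [dcLoop, if_pos hc]
      rcases ih (s1.erase c) (s2.erase c) with ⟨ihl, ihr⟩
      rw [ihl, ihr, he1, he2]
      exact ⟨key s1 hp1, key s2 hp2⟩
    · have hz : s1.count c = 0 ∨ s2.count c = 0 := by
        rcases not_and_or.1 hc with h | h
        · exact Or.inl (List.count_eq_zero.2 h)
        · exact Or.inr (List.count_eq_zero.2 h)
      have hmin : ((c :: rest : List Char) : Multiset Char) ∩ (s1 : Multiset Char) ∩ (s2 : Multiset Char)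
          = (rest : Multiset Char) ∩ (s1 : Multiset Char) ∩ (s2 : Multiset Char) := by
        ext x
        by_cases hx : c = x
        · subst hx
          simp only [Multiset.count_inter, Multiset.cons_coe, Multiset.count_cons,
            Multiset.coe_count]
          rcases hz with h | h <;> simp [List.count_cons, List.count_bagInter, h]
        · simp [Multiset.count_inter, List.count_bagInter, hx]
      simp only [dcLoop, if_neg hc]
      rcases ih s1 s2 with ⟨ihl, ihr⟩
      rw [ihl, ihr, hmin]
      exact ⟨rfl, rfl⟩

-- A's result is the symmetric-difference size, whichever string is the pivot
theorem different_characters_eq_sdCard (string1 string2 : String) :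
    different_characters string1 string2 = (sdCard string1.toList string2.toList : Int) := by
  unfold different_characters
  set l1 := string1.toList
  set l2 := string2.toList
  have main : ∀ p : List Char,
      ((p : Multiset Char) ∩ (l1 : Multiset Char) ∩ (l2 : Multiset Char)
        = (l1 : Multiset Char) ∩ (l2 : Multiset Char)) →
      (((dcLoop p l1 l2).1 ++ (dcLoop p l1 l2).2).length : Int) = (sdCard l1 l2 : Int) := by
    intro p hp
    rcases dcLoop_coe p l1 l2 with ⟨h1, h2⟩
    have hs1 : (l1 : Multiset Char) - ((l1 : Multiset Char) ∩ (l2 : Multiset Char))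
        = (l1 : Multiset Char) - (l2 : Multiset Char) := by
      ext x
      simp only [Multiset.count_sub, Multiset.count_inter]
      omega
    have hs2 : (l2 : Multiset Char) - ((l1 : Multiset Char) ∩ (l2 : Multiset Char))
        = (l2 : Multiset Char) - (l1 : Multiset Char) := by
      ext x
      simp only [Multiset.count_sub, Multiset.count_inter]
      omega
    have hnat : ((dcLoop p l1 l2).1 ++ (dcLoop p l1 l2).2).length = sdCard l1 l2 := by
      have hlen : ((dcLoop p l1 l2).1 ++ (dcLoop p l1 l2).2).length
          = Multiset.card (((dcLoop p l1 l2).1 : Multiset Char))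
            + Multiset.card (((dcLoop p l1 l2).2 : Multiset Char)) := by
        simp
      rw [hlen, h1, h2, hp, hs1, hs2]
      simp [sdCard]
    exact_mod_cast congrArg (fun n : Nat => (n : Int)) hnat
  by_cases hlen : l1.length > l2.length
  · simp only [if_pos hlen]
    exact main l2 (by
      ext x
      simp only [Multiset.count_inter]
      omega)
  · simp only [if_neg hlen]
    exact main l1 (by
      ext x
      simp only [Multiset.count_inter]
      omega)

-- ===== VERDICT (by name: the statement is the Claim_ definition above) =====
theorem different_characters_spec : Claim_equal_different_characters := by
  intro string1 string2 _
  unfold Spec_different_characters different_characters_alt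
  rw [different_characters_eq_sdCard]
  rw [mergeDiff_eq_sdCard _ _ (PySem.List.sorted_pairwise _ _) (PySem.List.sorted_pairwise _ _)]
  congr 1
  rw [sdCard_perm_left _ string1.toList _ (PySem.List.sorted_perm _ _ _),
    sdCard_perm_right _ _ string2.toList (PySem.List.sorted_perm _ _ _)]
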